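-- pv_equiv track=rewrite | github.com/yeheun-ktcloud/azure-resource-export | main.py | build_mysql_rows
-- ===== SOURCE A (Python) =====
-- from typing import List, Dict, Any, Tuple, Set
--
-- def build_mysql_rows(env: str, items: List[Dict[str, Any]]) -> List[Dict[str, Any]]:
--     return [{
--         "Environment": env,
--         "SubscriptionID": i.get("subscriptionId",""),
--         "ResourceGroup":  i.get("resourceGroup",""),
--         "ResourceName":   i.get("name",""),
--         "Type":           i.get("type",""),
--         "Location":       i.get("location",""),
--         "SKU":            i.get("skuName",""),
--         "Version":        i.get("version",""),
--         "Storage Size":   i.get("storageSizeGB",""),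
--         "Storage IOPS":   i.get("storageIops",""),
--         "HA":             i.get("HA",""),
--         "Endpoint":       i.get("fqdn","")
--     } for i in items]
-- ===== SOURCE B (Python) =====
-- # B: column-major construction — build one full column per field (12 staged passes
-- # over items), then transpose the columns into per-item row dicts.
-- SOURCES = ["subscriptionId", "resourceGroup", "name", "type", "location", "skuName",
--            "version", "storageSizeGB", "storageIops", "HA", "fqdn"]
-- LABELS = ["Environment", "SubscriptionID", "ResourceGroup", "ResourceName", "Type",
--           "Location", "SKU", "Version", "Storage Size", "Storage IOPS", "HA", "Endpoint"]
--
-- def build_mysql_rows(env, items):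
--     n = len(items)
--     cols = [[env] * n]
--     for src in SOURCES:
--         cols.append([i.get(src, "") for i in items])
--     return [dict(zip(LABELS, (col[k] for col in cols))) for k in range(n)]
-- ===== Notes on version B (the rewrite author's own statement) =====
-- stated objective: alternative
-- what changed: Column-major instead of row-major: B makes one pass per field building 12 full columns (SubscriptionID column, ResourceGroup column, ...), then transposes, assembling each row dict by zipping the label list with the k-th entry of every column; A builds each row dict directly in a single pass over items.
import Mathlib
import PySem

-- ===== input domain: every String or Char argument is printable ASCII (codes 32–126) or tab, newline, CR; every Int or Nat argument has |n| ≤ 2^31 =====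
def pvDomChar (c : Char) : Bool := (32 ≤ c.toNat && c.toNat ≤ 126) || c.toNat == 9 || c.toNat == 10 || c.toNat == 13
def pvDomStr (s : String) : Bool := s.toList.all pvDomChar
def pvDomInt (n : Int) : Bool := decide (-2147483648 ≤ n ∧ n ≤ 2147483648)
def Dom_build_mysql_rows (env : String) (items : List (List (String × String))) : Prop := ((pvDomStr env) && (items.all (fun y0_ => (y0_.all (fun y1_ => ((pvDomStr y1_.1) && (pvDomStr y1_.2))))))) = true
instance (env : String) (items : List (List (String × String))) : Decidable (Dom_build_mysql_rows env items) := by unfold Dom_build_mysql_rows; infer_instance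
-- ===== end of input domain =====

-- B builds the table column-major (one pass per field producing 12 full columns, then a
-- transpose zipping labels with the k-th entry of every column) instead of A's row-major
-- single pass; same output (alternative objective).

-- ===== PORT A =====
def build_mysql_rows (env : String) (items : List (List (String × String))) : List (List (String × String)) :=
  items.map (fun i =>
    [("Environment", env),
     ("SubscriptionID", (PySem.Dict.mk i).getD "subscriptionId" ""),
     ("ResourceGroup",  (PySem.Dict.mk i).getD "resourceGroup" ""),
     ("ResourceName",   (PySem.Dict.mk i).getD "name" ""),
     ("Type",           (PySem.Dict.mk i).getD "type" ""),
     ("Location",       (PySem.Dict.mk i).getD "location" ""),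
     ("SKU",            (PySem.Dict.mk i).getD "skuName" ""),
     ("Version",        (PySem.Dict.mk i).getD "version" ""),
     ("Storage Size",   (PySem.Dict.mk i).getD "storageSizeGB" ""),
     ("Storage IOPS",   (PySem.Dict.mk i).getD "storageIops" ""),
     ("HA",             (PySem.Dict.mk i).getD "HA" ""),
     ("Endpoint",       (PySem.Dict.mk i).getD "fqdn" "")])

-- ===== PORT B =====
def pvSources : List String :=
  ["subscriptionId", "resourceGroup", "name", "type", "location", "skuName",
   "version", "storageSizeGB", "storageIops", "HA", "fqdn"]

def pvLabels : List String :=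
  ["Environment", "SubscriptionID", "ResourceGroup", "ResourceName", "Type",
   "Location", "SKU", "Version", "Storage Size", "Storage IOPS", "HA", "Endpoint"]

-- dict(zip(LABELS, vals)) with the 12 distinct labels is the zipped association list itself
def build_mysql_rows_alt (env : String) (items : List (List (String × String))) : List (List (String × String)) :=
  let n : Nat := items.length
  let cols : List (List String) :=
    pvSources.foldl
      (fun cs src => cs ++ [items.map (fun i => (PySem.Dict.mk i).getD src "")])
      [List.replicate n env]
  (PySem.List.pyRange 0 (n : Int) 1).map
    (fun k => pvLabels.zip (cols.map (fun col => PySem.List.pyGetD col k "")))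

-- ===== PRECONDITION & SPEC =====
def Spec_build_mysql_rows (env : String) (items : List (List (String × String))) (out : List (List (String × String))) : Prop := out = build_mysql_rows_alt env items
instance (env : String) (items : List (List (String × String))) (out : List (List (String × String))) : Decidable (Spec_build_mysql_rows env items out) := by unfold Spec_build_mysql_rows; infer_instance

-- ===== CLAIM (what is proved, stated in full; the proofs are below) =====
def Claim_equal_build_mysql_rows : Prop := ∀ (env : String) (items : List (List (String × String))), Dom_build_mysql_rows env items → Spec_build_mysql_rows env items (build_mysql_rows env items)

-- ===== LEMMAS AND PROOFS =====
theorem pv_alt_getElem (env : String) (items : List (List (String × String)))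
    (k : Nat) (hk : k < items.length) :
    pvLabels.zip
      (((pvSources.foldl
          (fun cs src => cs ++ [items.map (fun i => (PySem.Dict.mk i).getD src "")])
          [List.replicate items.length env]).map
        (fun col => PySem.List.pyGetD col (k : Int) ""))) =
      [("Environment", env),
       ("SubscriptionID", (PySem.Dict.mk items[k]).getD "subscriptionId" ""),
       ("ResourceGroup",  (PySem.Dict.mk items[k]).getD "resourceGroup" ""),
       ("ResourceName",   (PySem.Dict.mk items[k]).getD "name" ""),
       ("Type",           (PySem.Dict.mk items[k]).getD "type" ""),
       ("Location",       (PySem.Dict.mk items[k]).getD "location" ""),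
       ("SKU",            (PySem.Dict.mk items[k]).getD "skuName" ""),
       ("Version",        (PySem.Dict.mk items[k]).getD "version" ""),
       ("Storage Size",   (PySem.Dict.mk items[k]).getD "storageSizeGB" ""),
       ("Storage IOPS",   (PySem.Dict.mk items[k]).getD "storageIops" ""),
       ("HA",             (PySem.Dict.mk items[k]).getD "HA" ""),
       ("Endpoint",       (PySem.Dict.mk items[k]).getD "fqdn" "")] := by
  simp [pvSources, pvLabels, PySem.List.pyGetD_natCast, hk,
    List.getElem_replicate, List.zip]

-- ===== VERDICT (by name: the statement is the Claim_ definition above) =====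
theorem build_mysql_rows_spec : Claim_equal_build_mysql_rows := by
  intro env items _
  unfold Spec_build_mysql_rows build_mysql_rows build_mysql_rows_alt
  dsimp only
  rw [PySem.List.pyRange_zero_nat]
  apply List.ext_getElem
  · simp
  · intro k h1 h2
    simp only [List.getElem_map, List.getElem_range]
    rw [pv_alt_getElem env items k (by simpa using h1)]
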